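-- pv_equiv track=rewrite | github.com/ankkalampi/algolabra-shakki | src/precomputation.py | precompute_single_bishop_attack_table
-- ===== SOURCE A (Python) =====
-- def precompute_single_bishop_attack_table(square):
--     """
--     Compute and return an attack table (bitboard)
--     for biashop in a specific square
--
--     Args:
--     square: the square index (integer, in range (0,64))
--
--     Returns:
--     bitboard: 64-bit bitboard representation of attack board/table
--     """
--     bitboard = 0
--
--     # get rank and file of the square
--     rank = square // 8
--     file = square % 8
--
--     space_right = file      # number of squares to the right
--     space_left = 7 - file   # number of squares to the left
--     space_down = rank       # number of squares below
--     space_up = 7 - rank     # number of squares above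
--
--     # diagonal lengths
--     # order: northeast, southeast, southwest, northwest
--     diagonal_lengths = [min(space_right, space_up),
--                         min(space_right, space_down),
--                         min(space_down, space_left),
--                         min(space_left, space_up)]
--
--     # scalars for diagonal bit shifts
--     # order: northeast, southeast, southwest, northwest
--     diagonal_scalars = [7, -9, -7, 9]
--
--     # add diagonals to bitboard
--     for diagonal in range (0,4):
--         move_bitboard = 0
--         for move in range(1, diagonal_lengths[diagonal]+1 ):
--             # create temporary bitboard for a single move, and combine that bitboard with the main bitboard
--
--             temp_bitboard = 0
--             temp_bitboard |= (1 << square)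
--             if diagonal_scalars[diagonal] < 0:
--                 move_bitboard = (temp_bitboard >> (move * abs(diagonal_scalars[diagonal]))) & 0xFFFFFFFFFFFFFFFF # masking makes sure no extra bits are added
--             else:
--                 move_bitboard = (temp_bitboard << (move * diagonal_scalars[diagonal])) & 0xFFFFFFFFFFFFFFFF # masking makes sure no extra bits are added
--             bitboard |= move_bitboard
--
--     return bitboard
-- ===== SOURCE B (Python) =====
-- def precompute_single_bishop_attack_table(square):
--     """Bishop attack bitboard via a board-bounded coordinate walk in the
--     four diagonal directions (no precomputed diagonal lengths, no masking)."""
--     rank, file = divmod(square, 8)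
--     bitboard = 0
--     for dr, df in ((1, -1), (-1, -1), (-1, 1), (1, 1)):
--         r, f = rank + dr, file + df
--         while 0 <= r <= 7 and 0 <= f <= 7:
--             bitboard |= 1 << (r * 8 + f)
--             r += dr
--             f += df
--     return bitboard
-- ===== Notes on version B (the rewrite author's own statement) =====
-- stated objective: idiomatic
-- what changed: Replaces A's precomputed min-based diagonal lengths and shift/mask arithmetic with a coordinate walk: step (rank,file) in each of the four diagonal directions while on the board, setting bits directly, so no masking is needed.
-- outside the precondition, e.g. on precompute_single_bishop_attack_table(72): A returns 290499906672525312, B returns 0; on precompute_single_bishop_attack_table(-1): A raises ValueError, B returns 283691315109952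
import Mathlib
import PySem

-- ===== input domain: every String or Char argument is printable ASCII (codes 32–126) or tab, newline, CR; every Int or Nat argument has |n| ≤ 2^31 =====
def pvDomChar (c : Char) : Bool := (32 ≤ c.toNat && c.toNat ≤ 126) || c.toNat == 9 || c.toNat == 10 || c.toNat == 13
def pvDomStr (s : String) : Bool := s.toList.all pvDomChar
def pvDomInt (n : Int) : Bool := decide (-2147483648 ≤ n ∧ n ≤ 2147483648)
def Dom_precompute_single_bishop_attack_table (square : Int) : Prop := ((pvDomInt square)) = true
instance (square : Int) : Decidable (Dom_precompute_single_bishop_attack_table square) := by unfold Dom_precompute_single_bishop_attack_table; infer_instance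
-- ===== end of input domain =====

-- B replaces A's precomputed min-based diagonal lengths and shift/mask arithmetic with a
-- board-bounded (rank,file) coordinate walk in the four diagonal directions (idiomatic; no masking).

-- ===== PORT A =====
def precompute_single_bishop_attack_table (square : Int) : Int :=
  let bitboard : Int := 0
  let rank := PySem.Int.floordiv square 8
  let file := PySem.Int.mod square 8
  let space_right := file
  let space_left := 7 - file
  let space_down := rank
  let space_up := 7 - rank
  let diagonal_lengths : List Int :=
    [min space_right space_up, min space_right space_down,
     min space_down space_left, min space_left space_up]
  let diagonal_scalars : List Int := [7, -9, -7, 9]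
  (PySem.List.pyRange 0 4 1).foldl (fun bitboard diagonal =>
    (PySem.List.pyRange 1 (PySem.List.pyGetD diagonal_lengths diagonal 0 + 1) 1).foldl
      (fun bitboard move =>
        let sc := PySem.List.pyGetD diagonal_scalars diagonal 0
        let temp_bitboard : Int := PySem.Int.bor 0 (1 <<< square.toNat)
        let move_bitboard : Int :=
          if sc < 0 then
            PySem.Int.band (temp_bitboard >>> (move * (sc.natAbs : Int)).toNat) 0xFFFFFFFFFFFFFFFF
          else
            PySem.Int.band (temp_bitboard <<< (move * sc).toNat) 0xFFFFFFFFFFFFFFFF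
        PySem.Int.bor bitboard move_bitboard)
      bitboard)
    bitboard

-- ===== PORT B =====
-- the 'while 0 <= r <= 7 and 0 <= f <= 7' loop of Source B; fuel 10 only makes it total
-- (a diagonal holds at most 8 board squares, so the range check always ends the walk first)
def pvWalk (fuel : Nat) (dr df r f bb : Int) : Int :=
  match fuel with
  | 0 => bb
  | Nat.succ fuel =>
    if 0 ≤ r ∧ r ≤ 7 ∧ 0 ≤ f ∧ f ≤ 7 then
      pvWalk fuel dr df (r + dr) (f + df) (PySem.Int.bor bb (1 <<< (r * 8 + f).toNat))
    else bb

def precompute_single_bishop_attack_table_alt (square : Int) : Int :=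
  let rank := PySem.Int.floordiv square 8
  let file := PySem.Int.mod square 8
  ([((1:Int), (-1:Int)), (-1, -1), (-1, 1), (1, 1)]).foldl
    (fun bb d => pvWalk 10 d.1 d.2 (rank + d.1) (file + d.2) bb) 0

-- ===== PRECONDITION & SPEC =====
-- Pre_ excludes negative squares, on which A raises ValueError (negative shift count), and the
-- off-board band 72..119, where A's right-shift-and-mask arithmetic can leak bits of the fictitious
-- square back onto the board while B's board-bounded walk sets none — an unspecified
-- off-board corner (the docstring admits only on-board square indices), so neither value is contracted.
def Pre_precompute_single_bishop_attack_table (square : Int) : Prop :=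
  0 ≤ square ∧ (square < 72 ∨ 120 ≤ square)
instance (square : Int) : Decidable (Pre_precompute_single_bishop_attack_table square) := by
  unfold Pre_precompute_single_bishop_attack_table; infer_instance

def pvWitness_precompute_single_bishop_attack_table : Int := 28

def Spec_precompute_single_bishop_attack_table (square : Int) (out : Int) : Prop :=
  out = precompute_single_bishop_attack_table_alt square
instance (square : Int) (out : Int) : Decidable (Spec_precompute_single_bishop_attack_table square out) := by
  unfold Spec_precompute_single_bishop_attack_table; infer_instance

-- ===== CLAIM =====
def Claim_equal_precompute_single_bishop_attack_table : Prop :=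
  ∀ (square : Int), Dom_precompute_single_bishop_attack_table square →
    Pre_precompute_single_bishop_attack_table square →
    Spec_precompute_single_bishop_attack_table square (precompute_single_bishop_attack_table square)

-- ===== LEMMAS AND PROOFS =====

theorem pv_shift1 (n : Nat) : ((1:Int) <<< n) = ((1 <<< n : Nat) : Int) := rfl
theorem pv_shift2 (m k : Nat) : (((m:Nat) : Int) >>> k) = ((m >>> k : Nat) : Int) := rfl
theorem pv_mask_zero (m : Nat) (hd : 2^64 ∣ m) :
    PySem.Int.band ((m : Nat) : Int) 0xFFFFFFFFFFFFFFFF = 0 := by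
  have h1 : (0xFFFFFFFFFFFFFFFF : Int) = ((0xFFFFFFFFFFFFFFFF : Nat) : Int) := by norm_num
  have h2 : (0xFFFFFFFFFFFFFFFF : Nat) = 2^64 - 1 := by norm_num
  rw [h1, PySem.Int.band_natCast, h2, Nat.and_two_pow_sub_one_eq_mod, Nat.mod_eq_zero_of_dvd hd]
  rfl
theorem pv_contrib_right (n k : Nat) (h : 64 + k ≤ n) :
    PySem.Int.band (((1:Int) <<< n) >>> k) 0xFFFFFFFFFFFFFFFF = 0 := by
  rw [pv_shift1, pv_shift2]
  apply pv_mask_zero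
  rw [Nat.shiftRight_eq_div_pow, Nat.one_shiftLeft, Nat.pow_div (by omega) (by norm_num)]
  exact pow_dvd_pow 2 (by omega)
theorem pv_foldl_bor_zero (l : List Int) (g : Int → Int) (acc : Int)
    (h : ∀ m ∈ l, g m = 0) : l.foldl (fun bb m => PySem.Int.bor bb (g m)) acc = acc := by
  induction l generalizing acc with
  | nil => rfl
  | cons x xs ih =>
    have hx : g x = 0 := h x (by simp)
    simp only [List.foldl, hx, PySem.Int.bor_zero]
    exact ih acc (fun m hm => h m (by simp [hm]))

-- for square ≥ 120 every move of A's two right-shift diagonals lands above bit 63 and is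
-- masked away, and its two left-shift diagonals have negative lengths (empty ranges)
theorem pv_A_zero (s : Int) (hs : 120 ≤ s) : precompute_single_bishop_attack_table s = 0 := by
  have hf0 : 0 ≤ PySem.Int.mod s 8 := PySem.Int.mod_nonneg s (by norm_num)
  have hf7 : PySem.Int.mod s 8 < 8 := PySem.Int.mod_lt s (by norm_num)
  have heq : PySem.Int.floordiv s 8 * 8 + PySem.Int.mod s 8 = s := PySem.Int.floordiv_mul_add_mod s 8
  have hsn : (s.toNat : Int) = s := Int.toNat_of_nonneg (by omega)
  generalize hR : PySem.Int.floordiv s 8 = r at heq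
  generalize hF : PySem.Int.mod s 8 = f at heq hf0 hf7
  have hrange : PySem.List.pyRange 0 4 1 = [0, 1, 2, 3] := by decide
  have hg0 : ∀ (a b c d : Int), PySem.List.pyGetD [a,b,c,d] 0 0 = a := fun _ _ _ _ => rfl
  have hg1 : ∀ (a b c d : Int), PySem.List.pyGetD [a,b,c,d] 1 0 = b := fun _ _ _ _ => rfl
  have hg2 : ∀ (a b c d : Int), PySem.List.pyGetD [a,b,c,d] 2 0 = c := fun _ _ _ _ => rfl
  have hg3 : ∀ (a b c d : Int), PySem.List.pyGetD [a,b,c,d] 3 0 = d := fun _ _ _ _ => rfl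
  have hbor0 : ∀ a : Int, PySem.Int.bor 0 a = a := fun a => by
    rw [PySem.Int.bor_comm, PySem.Int.bor_zero]
  simp only [precompute_single_bishop_attack_table, hrange, List.foldl, hR, hF,
    hg0, hg1, hg2, hg3, hbor0]
  norm_num
  rw [PySem.List.pyRange_one_eq_nil (show min f (7 - r) + 1 ≤ 1 by omega)]
  rw [PySem.List.pyRange_one_eq_nil (show min (7 - f) (7 - r) + 1 ≤ 1 by omega)]
  simp only [List.foldl]
  rw [pv_foldl_bor_zero _ (fun m => PySem.Int.band (((1:Int) <<< s.toNat) >>> (m * 9).toNat) 0xFFFFFFFFFFFFFFFF) _ ?_]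
  · rw [pv_foldl_bor_zero _ (fun m => PySem.Int.band (((1:Int) <<< s.toNat) >>> (m * 7).toNat) 0xFFFFFFFFFFFFFFFF) _ ?_]
    intro m hm
    rw [PySem.List.mem_pyRange_one] at hm
    exact pv_contrib_right _ _ (by omega)
  · intro m hm
    rw [PySem.List.mem_pyRange_one] at hm
    exact pv_contrib_right _ _ (by omega)

theorem pv_walk_out (n : Nat) (dr df r f bb : Int) (h : 7 < r) : pvWalk (n+1) dr df r f bb = bb := by
  simp [pvWalk]; omega

-- for square ≥ 120 every walk of B starts at rank ≥ 14, off the board, and adds nothing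
theorem pv_alt_zero (s : Int) (h : 120 ≤ s) : precompute_single_bishop_attack_table_alt s = 0 := by
  have hr : 15 ≤ PySem.Int.floordiv s 8 := by
    rw [PySem.Int.le_floordiv_iff_mul_le (by norm_num)]; omega
  simp only [precompute_single_bishop_attack_table_alt, List.foldl]
  rw [pv_walk_out _ _ _ _ _ _ (by omega), pv_walk_out _ _ _ _ _ _ (by omega),
      pv_walk_out _ _ _ _ _ _ (by omega), pv_walk_out _ _ _ _ _ _ (by omega)]

-- ===== VERDICT =====
theorem precompute_single_bishop_attack_table_spec : Claim_equal_precompute_single_bishop_attack_table := by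
  intro s _ hPre
  obtain ⟨h0, hband⟩ := hPre
  unfold Spec_precompute_single_bishop_attack_table
  rcases hband with h72 | h120
  · interval_cases s <;> decide
  · rw [pv_A_zero s h120, pv_alt_zero s h120]
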